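-- pv_equiv track=rewrite | github.com/ChenShizhe/paper-reader | paper-reader/scripts/convergence_rate_extractor.py | _check_optimality_verified
-- ===== SOURCE A (Python) =====
-- def _check_optimality_verified(rates: list[dict]) -> bool:
--     """Return True when a lower_bound entry matches an upper_bound on estimand+rate."""
--     upper_bounds = [r for r in rates if r.get("type") in ("upper_bound", "exact", "minimax")]
--     lower_bounds = [r for r in rates if r.get("type") == "lower_bound"]
--
--     if not lower_bounds:
--         return False
--
--     for lb in lower_bounds:
--         lb_estimand = lb.get("estimand")
--         lb_rate = lb.get("rate")
--         for ub in upper_bounds: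
--             if lb_estimand and lb_estimand == ub.get("estimand"):
--                 if lb_rate and lb_rate == ub.get("rate"):
--                     return True
--     return False
-- ===== SOURCE B (Python) =====
-- def _check_optimality_verified(rates: list[dict]) -> bool:
--     """Return True when a lower_bound entry matches an upper_bound on estimand+rate."""
--     uppers = {(r.get("estimand"), r.get("rate"))
--               for r in rates
--               if r.get("type") in ("upper_bound", "exact", "minimax")}
--     lowers = {(r.get("estimand"), r.get("rate"))
--               for r in rates
--               if r.get("type") == "lower_bound" and r.get("estimand") and r.get("rate")}
--     return bool(uppers & lowers)
-- ===== Notes on version B (the rewrite author's own statement) =====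
-- stated objective: idiomatic
-- what changed: Replaced the two filtered lists plus nested loop with early return by two set comprehensions of (estimand, rate) pairs and a single set intersection; truthiness is checked once while building the lower set and the empty-lowers guard disappears.
import Mathlib
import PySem

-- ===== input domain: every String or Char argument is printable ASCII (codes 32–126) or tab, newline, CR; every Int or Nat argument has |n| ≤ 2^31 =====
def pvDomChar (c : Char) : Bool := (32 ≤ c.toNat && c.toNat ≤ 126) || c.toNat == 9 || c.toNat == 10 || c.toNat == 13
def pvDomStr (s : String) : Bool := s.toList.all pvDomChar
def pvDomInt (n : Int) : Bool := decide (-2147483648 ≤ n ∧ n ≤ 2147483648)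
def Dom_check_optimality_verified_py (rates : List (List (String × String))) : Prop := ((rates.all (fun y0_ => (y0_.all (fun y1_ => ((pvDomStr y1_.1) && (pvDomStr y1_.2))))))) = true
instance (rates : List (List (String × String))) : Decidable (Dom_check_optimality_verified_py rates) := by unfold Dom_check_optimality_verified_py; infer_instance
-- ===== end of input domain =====

-- B replaces A's filtered lists + nested loop + early return by two sets of (estimand, rate)
-- pairs and a single set intersection (more idiomatic; same result).


-- ===== PORT A =====
-- r.get(k) on a dict (assoc list, first match)
def pvGet (r : List (String × String)) (k : String) : Option String :=
  (PySem.Dict.mk r).get? k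

-- Python truthiness of an Optional[str]: non-None and non-empty
def pvTruthy (o : Option String) : Bool :=
  match o with
  | none => false
  | some s => !(s == "")

def check_optimality_verified_py (rates : List (List (String × String))) : Bool :=
  let upper_bounds := rates.filter (fun r =>
    pvGet r "type" == some "upper_bound" || pvGet r "type" == some "exact" ||
      pvGet r "type" == some "minimax")
  let lower_bounds := rates.filter (fun r => pvGet r "type" == some "lower_bound")
  if lower_bounds.isEmpty then false
  else
    -- the nested for-loops with early 'return True' = List.any over both lists
    lower_bounds.any (fun lb =>
      let lb_estimand := pvGet lb "estimand"
      let lb_rate := pvGet lb "rate"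
      upper_bounds.any (fun ub =>
        pvTruthy lb_estimand && lb_estimand == pvGet ub "estimand" &&
          (pvTruthy lb_rate && lb_rate == pvGet ub "rate")))

-- ===== PORT B =====
def check_optimality_verified_py_alt (rates : List (List (String × String))) : Bool :=
  let uppers : PySem.Set (Option String × Option String) :=
    PySem.Set.ofList ((rates.filter (fun r =>
      pvGet r "type" == some "upper_bound" || pvGet r "type" == some "exact" ||
        pvGet r "type" == some "minimax")).map (fun r => (pvGet r "estimand", pvGet r "rate")))
  let lowers : PySem.Set (Option String × Option String) :=
    PySem.Set.ofList ((rates.filter (fun r =>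
      pvGet r "type" == some "lower_bound" && pvTruthy (pvGet r "estimand") &&
        pvTruthy (pvGet r "rate"))).map (fun r => (pvGet r "estimand", pvGet r "rate")))
  !(PySem.Set.inter uppers lowers).isEmpty

-- ===== PRECONDITION & SPEC =====
def Spec_check_optimality_verified_py (rates : List (List (String × String))) (out : Bool) : Prop := out = check_optimality_verified_py_alt rates
instance (rates : List (List (String × String))) (out : Bool) : Decidable (Spec_check_optimality_verified_py rates out) := by unfold Spec_check_optimality_verified_py; infer_instance

-- ===== CLAIM (what is proved, stated in full; the proofs are below) =====
def Claim_equal_check_optimality_verified_py : Prop := ∀ (rates : List (List (String × String))), Dom_check_optimality_verified_py rates → Spec_check_optimality_verified_py rates (check_optimality_verified_py rates)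

-- ===== LEMMAS AND PROOFS =====
theorem check_eq (rates : List (List (String × String))) :
    check_optimality_verified_py rates = check_optimality_verified_py_alt rates := by
  unfold check_optimality_verified_py check_optimality_verified_py_alt
  simp only []
  rw [Bool.eq_iff_iff]
  split_ifs with h
  · simp only [false_iff, Bool.not_eq_true', List.isEmpty_eq_false_iff]
    rw [List.isEmpty_iff, List.filter_eq_nil_iff] at h
    have h2 : (rates.filter (fun r =>
        pvGet r "type" == some "lower_bound" && pvTruthy (pvGet r "estimand") &&
          pvTruthy (pvGet r "rate"))) = [] := by
      rw [List.filter_eq_nil_iff]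
      intro a ha
      have := h a ha
      simp_all
    rw [h2]
    intro hne
    apply hne
    rw [List.eq_nil_iff_forall_not_mem]
    intro x hx
    rw [PySem.Set.mem_inter, PySem.Set.mem_ofList, PySem.Set.mem_ofList] at hx
    simp at hx
  · simp only [List.any_eq_true, List.mem_filter, Bool.not_eq_true', List.isEmpty_eq_false_iff]
    rw [Ne, List.eq_nil_iff_forall_not_mem]
    push Not
    constructor
    · rintro ⟨lb, ⟨hlbm, hlbt⟩, ub, ⟨hubm, hubt⟩, hc⟩
      simp only [Bool.and_eq_true, beq_iff_eq] at hc
      refine ⟨(pvGet lb "estimand", pvGet lb "rate"), ?_⟩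
      rw [PySem.Set.mem_inter]
      constructor
      · rw [PySem.Set.mem_ofList]
        simp only [List.mem_map, List.mem_filter]
        exact ⟨ub, ⟨hubm, hubt⟩, by rw [hc.1.2, hc.2.2]⟩
      · rw [PySem.Set.mem_ofList]
        simp only [List.mem_map, List.mem_filter]
        exact ⟨lb, ⟨hlbm, by simp [hlbt, hc.1.1, hc.2.1]⟩, rfl⟩
    · rintro ⟨p, hp⟩
      rw [PySem.Set.mem_inter, PySem.Set.mem_ofList, PySem.Set.mem_ofList] at hp
      simp only [List.mem_map, List.mem_filter] at hp
      obtain ⟨⟨ub, ⟨hubm, hubt⟩, hpe⟩, ⟨lb, ⟨hlbm, hlbt⟩, hpl⟩⟩ := hp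
      simp only [Bool.and_eq_true, beq_iff_eq] at hlbt
      refine ⟨lb, ⟨hlbm, by simp [hlbt.1.1]⟩, ub, ⟨hubm, hubt⟩, ?_⟩
      have hpp : pvGet lb "estimand" = pvGet ub "estimand" ∧ pvGet lb "rate" = pvGet ub "rate" := by
        have h3 := hpl.trans hpe.symm
        simpa [Prod.ext_iff] using h3
      simp [← hpp.1, ← hpp.2, hlbt.1.2, hlbt.2]

-- ===== VERDICT (by name: the statement is the Claim_ definition above) =====
theorem check_optimality_verified_py_spec : Claim_equal_check_optimality_verified_py := by
  intro rates _
  exact check_eq rates
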